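-- pv_equiv track=rewrite | github.com/Karscoding/IOT-Project-Picoboot | datasim.py | convert_days_to_dutch
-- ===== SOURCE A (Python) =====
-- def convert_days_to_dutch(string):
--     days = {
--         'Monday': 'Maandag',
--         'Tuesday': 'Dinsdag',
--         'Wednesday': 'Woensdag',
--         'Thursday': 'Donderdag',
--         'Friday': 'Vrijdag',
--         'Saturday': 'Zaterdag',
--         'Sunday': 'Zondag'
--     }
--
--     for day, dutch_day in days.items():
--         if day in string:
--             string = string.replace(day, dutch_day)
--
--     return string
-- ===== SOURCE B (Python) =====
-- def convert_days_to_dutch(string):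
--     days = [
--         ('Monday', 'Maandag'),
--         ('Tuesday', 'Dinsdag'),
--         ('Wednesday', 'Woensdag'),
--         ('Thursday', 'Donderdag'),
--         ('Friday', 'Vrijdag'),
--         ('Saturday', 'Zaterdag'),
--         ('Sunday', 'Zondag'),
--     ]
--     out = []
--     i = 0
--     n = len(string)
--     while i < n:
--         for eng, dutch in days:
--             if string.startswith(eng, i):
--                 out.append(dutch)
--                 i += len(eng)
--                 break
--         else:
--             out.append(string[i])
--             i += 1
--     return ''.join(out)
-- ===== Notes on version B (the rewrite author's own statement) =====
-- stated objective: alternative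
-- what changed: A makes seven sequential whole-string membership-test + replace passes (one per day name); B makes a single left-to-right scan that substitutes each English day name by its Dutch translation as it is found, which yields the same string because the fourteen day names pairwise disagree within their first two characters.
import Mathlib
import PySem

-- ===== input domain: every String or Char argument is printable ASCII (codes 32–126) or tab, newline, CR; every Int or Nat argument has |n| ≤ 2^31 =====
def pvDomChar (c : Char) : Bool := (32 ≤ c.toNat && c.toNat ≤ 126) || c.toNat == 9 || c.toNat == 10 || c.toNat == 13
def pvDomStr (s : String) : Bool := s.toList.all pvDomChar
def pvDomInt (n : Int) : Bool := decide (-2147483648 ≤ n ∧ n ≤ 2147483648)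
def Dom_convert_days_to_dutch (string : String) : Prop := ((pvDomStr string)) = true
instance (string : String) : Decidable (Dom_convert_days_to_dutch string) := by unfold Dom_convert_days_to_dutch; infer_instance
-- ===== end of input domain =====

-- B replaces A's seven sequential whole-string `in`/`replace` passes by a single left-to-right
-- scan that substitutes each English day name as it is found (alternative algorithm, same result).

-- ===== PORT A =====
def convert_days_to_dutch (string : String) : String :=
  let days : PySem.Dict String String := PySem.Dict.ofList
    [("Monday", "Maandag"), ("Tuesday", "Dinsdag"), ("Wednesday", "Woensdag"),
     ("Thursday", "Donderdag"), ("Friday", "Vrijdag"), ("Saturday", "Zaterdag"),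
     ("Sunday", "Zondag")]
  days.items.foldl
    (fun s p => if PySem.Str.isIn p.1 s then PySem.Str.replace s p.1 p.2 else s)
    string

-- ===== PORT B =====
-- Source B's list of (english, dutch) pairs, as char lists
def altDays : List (List Char × List Char) :=
  [("Monday".toList, "Maandag".toList), ("Tuesday".toList, "Dinsdag".toList),
   ("Wednesday".toList, "Woensdag".toList), ("Thursday".toList, "Donderdag".toList),
   ("Friday".toList, "Vrijdag".toList), ("Saturday".toList, "Zaterdag".toList),
   ("Sunday".toList, "Zondag".toList)]

-- Source B's while loop: at each position try the seven names in order (first match wins),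
-- emit the Dutch word and skip the name's length, else emit the character
def altGo : List Char → List Char
  | [] => []
  | c :: t =>
    match hf : altDays.find? (fun p => PySem.Chars.startswith (c :: t) p.1) with
    | some p => p.2 ++ altGo ((c :: t).drop p.1.length)
    | none => c :: altGo t
termination_by s => s.length
decreasing_by
  · have hm := List.mem_of_find?_eq_some hf
    have hp : 0 < p.1.length := by fin_cases hm <;> decide
    simp; omega
  · simp

def convert_days_to_dutch_alt (string : String) : String :=
  String.ofList (altGo string.toList)

-- ===== PRECONDITION & SPEC =====
def Spec_convert_days_to_dutch (string : String) (out : String) : Prop := out = convert_days_to_dutch_alt string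
instance (string : String) (out : String) : Decidable (Spec_convert_days_to_dutch string out) := by unfold Spec_convert_days_to_dutch; infer_instance

-- ===== CLAIM (what is proved, stated in full; the proofs are below) =====
def Claim_equal_convert_days_to_dutch : Prop := ∀ (string : String), Dom_convert_days_to_dutch string → Spec_convert_days_to_dutch string (convert_days_to_dutch string)

-- ===== LEMMAS AND PROOFS =====

-- first letters of all fourteen words (English and Dutch day names)
def FC : List Char := ['M', 'T', 'W', 'F', 'S', 'D', 'V', 'Z']

-- p mismatches u at every start position strictly inside u
def MismatchInside (p u : List Char) : Prop :=
  ∀ j, j < u.length → ∃ i, i < p.length ∧ j + i < u.length ∧ p[i]? ≠ u[j + i]?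

-- Boolean version (for `decide` on the literal day-name table)
def mismatchInsideB (p u : List Char) : Bool :=
  (List.range u.length).all fun j =>
    (List.range p.length).any fun i => decide (j + i < u.length) && decide (p[i]? ≠ u[j + i]?)

theorem mismatchInsideB_spec {p u : List Char} (h : mismatchInsideB p u = true) :
    MismatchInside p u := by
  intro j hj
  simp only [mismatchInsideB, List.all_eq_true, List.any_eq_true, List.mem_range] at h
  obtain ⟨i, hi, hb⟩ := h j hj
  rw [Bool.and_eq_true] at hb
  exact ⟨i, hi, by simpa using hb.1, by simpa using hb.2⟩

-- single-pattern replace as a clean structural recursion (Python str.replace, old ≠ '')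
def rep1 (p r : List Char) : List Char → List Char
  | [] => []
  | c :: t =>
    if p.isPrefixOf (c :: t) then r ++ rep1 p r (t.drop (p.length - 1))
    else c :: rep1 p r t
termination_by s => s.length
decreasing_by all_goals (simp; try omega)

theorem replace_go_eq (p r : List Char) (hp : p ≠ []) :
    ∀ fuel l acc, l.length ≤ fuel →
      PySem.Chars.replace.go p r fuel l acc = acc.reverse ++ rep1 p r l := by
  intro fuel
  induction fuel with
  | zero =>
    intro l acc hl
    have : l = [] := by cases l <;> simp_all
    subst this
    simp [PySem.Chars.replace.go, rep1]
  | succ n ih =>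
    intro l acc hl
    match l with
    | [] => simp [PySem.Chars.replace.go, rep1]
    | c :: t =>
      rw [PySem.Chars.replace.go]
      by_cases hpre : p.isPrefixOf (c :: t)
      · rw [if_pos hpre]
        have hplen : 1 ≤ p.length := by cases p <;> simp_all
        have hdrop : (c :: t).drop p.length = t.drop (p.length - 1) := by
          cases p with
          | nil => exact absurd rfl hp
          | cons a q => simp
        rw [hdrop, ih _ _ (by simp at hl ⊢; omega)]
        rw [rep1, if_pos hpre]
        simp
      · rw [if_neg hpre, ih _ _ (by simp at hl ⊢; omega)]
        rw [rep1, if_neg hpre]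
        simp

theorem replace_eq_rep1 (s p r : List Char) (hp : p ≠ []) :
    PySem.Chars.replace s p r = rep1 p r s := by
  unfold PySem.Chars.replace
  rw [if_neg (by simpa using hp)]
  simpa using replace_go_eq p r hp s.length s [] le_rfl

theorem rep1_of_not_infix (p r : List Char) :
    ∀ s, ¬ p <:+: s → rep1 p r s = s := by
  intro s
  induction s with
  | nil => intro _; rw [rep1]
  | cons c t ih =>
    intro h
    rw [rep1, if_neg, ih (fun hi => h (hi.trans (List.suffix_cons c t).isInfix))]
    intro hpre
    exact h (List.isPrefixOf_iff_prefix.mp hpre).isInfix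

theorem not_prefix_of_mismatch {p u : List Char} (t : List Char)
    (h : MismatchInside p u) (hu : u ≠ []) : ¬ p <+: (u ++ t) := by
  intro hpre
  obtain ⟨i, hip, hiu, hne⟩ := h 0 (by cases u <;> simp_all)
  simp only [Nat.zero_add] at hiu hne
  apply hne
  have h1 : p[i]? = (u ++ t)[i]? := by
    rw [List.getElem?_eq_getElem hip, List.getElem?_eq_getElem (by simp; omega)]
    exact congrArg some (hpre.getElem hip)
  rw [h1, List.getElem?_append_left hiu]

theorem mismatch_tail {p : List Char} {c : Char} {u : List Char}
    (h : MismatchInside p (c :: u)) : MismatchInside p u := by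
  intro j hj
  obtain ⟨i, hip, hiu, hne⟩ := h (j + 1) (by simp; omega)
  exact ⟨i, hip, by simp at hiu; omega, by simpa [Nat.add_right_comm] using hne⟩

theorem rep1_append {p : List Char} (r : List Char) {u : List Char}
    (h : MismatchInside p u) : ∀ t, rep1 p r (u ++ t) = u ++ rep1 p r t := by
  induction u with
  | nil => intro t; rfl
  | cons c u' ih =>
    intro t
    have hnp : ¬ p.isPrefixOf ((c :: u') ++ t) := by
      intro hpre
      exact not_prefix_of_mismatch t h (by simp) (List.isPrefixOf_iff_prefix.mp hpre)
    rw [List.cons_append, rep1, if_neg (by simpa using hnp)]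
    rw [show u' ++ t = u' ++ t from rfl, ih (mismatch_tail h) t]
    simp

-- prefixes made of non-initial letters are invariant under one replace pass
theorem rep1_prefix_inv {n d : List Char}
    (hn : ∃ a t, n = a :: t ∧ a ∈ FC) (hd : ∃ a t, d = a :: t ∧ a ∈ FC) :
    ∀ s w, (∀ c ∈ w, c ∉ FC) → (w <+: rep1 n d s ↔ w <+: s) := by
  obtain ⟨nh, nt, rfl, hnFC⟩ := hn
  obtain ⟨dh, dt, rfl, hdFC⟩ := hd
  intro s
  induction s with
  | nil => intro w _; rw [rep1]
  | cons c t ih =>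
    intro w hw
    rw [rep1]
    by_cases hpre : (nh :: nt).isPrefixOf (c :: t)
    · rw [if_pos hpre]
      match w with
      | [] => simp
      | a :: w' =>
        have ha : a ∉ FC := hw a (by simp)
        have hc : c = nh := by
          have := (List.cons_prefix_cons.mp (List.isPrefixOf_iff_prefix.mp hpre)).1
          exact this.symm
        constructor
        · intro hp
          have : a = dh := (List.cons_prefix_cons.mp (by simpa using hp)).1
          exact absurd (this ▸ hdFC) ha
        · intro hp
          have : a = c := (List.cons_prefix_cons.mp hp).1
          exact absurd ((this.trans hc) ▸ hnFC) ha
    · rw [if_neg hpre]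
      match w with
      | [] => simp
      | a :: w' =>
        have := ih w' (fun x hx => hw x (by simp [hx]))
        constructor
        · intro hp
          rcases List.cons_prefix_cons.mp hp with ⟨rfl, hp'⟩
          exact List.cons_prefix_cons.mpr ⟨rfl, this.mp hp'⟩
        · intro hp
          rcases List.cons_prefix_cons.mp hp with ⟨rfl, hp'⟩
          exact List.cons_prefix_cons.mpr ⟨rfl, this.mpr hp'⟩

-- A's sequential passes, over a list of (pattern, replacement) pairs
def foldRep (ps : List (List Char × List Char)) (s : List Char) : List Char :=
  ps.foldl (fun s p => rep1 p.1 p.2 s) s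

-- the shape facts about the day-name table, checked once by `decide`
def goodTableB : Bool :=
  altDays.all fun p =>
    (!p.1.isEmpty) && (!p.2.isEmpty) &&
    (p.1.take 1).all (fun c => c ∈ FC) && (p.1.drop 1).all (fun c => c ∉ FC) &&
    (p.2.take 1).all (fun c => c ∈ FC) &&
    altDays.all fun q =>
      (decide (p.1 = q.1) || mismatchInsideB p.1 q.1) && mismatchInsideB p.1 q.2

theorem goodTable : goodTableB = true := by decide

theorem table_facts {p : List Char × List Char} (hp : p ∈ altDays) :
    p.1.isEmpty = false ∧ p.2.isEmpty = false ∧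
    (∀ c ∈ p.1.take 1, c ∈ FC) ∧ (∀ c ∈ p.1.drop 1, c ∉ FC) ∧
    (∀ c ∈ p.2.take 1, c ∈ FC) ∧
    ∀ q ∈ altDays, (p.1 = q.1 ∨ mismatchInsideB p.1 q.1 = true) ∧
      mismatchInsideB p.1 q.2 = true := by
  have hg := goodTable
  unfold goodTableB at hg
  have h' := List.all_eq_true.mp hg p hp
  simp only [Bool.and_eq_true] at h'
  obtain ⟨⟨⟨⟨⟨h1, h2⟩, h3⟩, h4⟩, h5⟩, h6⟩ := h'
  refine ⟨by simpa using h1, by simpa using h2, ?_, ?_, ?_, ?_⟩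
  · intro c hc; simpa using List.all_eq_true.mp h3 c hc
  · intro c hc; simpa using List.all_eq_true.mp h4 c hc
  · intro c hc; simpa using List.all_eq_true.mp h5 c hc
  · intro q hq
    have hb := List.all_eq_true.mp h6 q hq
    rw [Bool.and_eq_true] at hb
    refine ⟨?_, hb.2⟩
    rcases (Bool.or_eq_true _ _).mp hb.1 with h | h
    · exact Or.inl (by simpa using h)
    · exact Or.inr h

theorem table_fst_shape {p : List Char × List Char} (hp : p ∈ altDays) :
    ∃ a t, p.1 = a :: t ∧ a ∈ FC ∧ ∀ c ∈ t, c ∉ FC := by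
  obtain ⟨h1, _, h3, h4, _, _⟩ := table_facts hp
  cases he : p.1 with
  | nil => rw [he] at h1; simp at h1
  | cons a t =>
    refine ⟨a, t, rfl, ?_, ?_⟩
    · have := h3 a; rw [he] at this; exact this (by simp)
    · intro c hc; have := h4 c; rw [he] at this; exact this (by simpa using hc)

theorem table_snd_shape {p : List Char × List Char} (hp : p ∈ altDays) :
    ∃ a t, p.2 = a :: t ∧ a ∈ FC := by
  obtain ⟨_, h2, _, _, h5, _⟩ := table_facts hp
  cases he : p.2 with
  | nil => rw [he] at h2; simp at h2
  | cons a t =>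
    refine ⟨a, t, rfl, ?_⟩
    have := h5 a; rw [he] at this; exact this (by simp)

theorem table_mismatch_fst {p q : List Char × List Char} (hp : p ∈ altDays)
    (hq : q ∈ altDays) (hne : p.1 ≠ q.1) : MismatchInside p.1 q.1 := by
  have h6 := (table_facts hp).2.2.2.2.2
  rcases (h6 q hq).1 with h' | h'
  · exact absurd h' hne
  · exact mismatchInsideB_spec h'

theorem table_mismatch_snd {p q : List Char × List Char} (hp : p ∈ altDays)
    (hq : q ∈ altDays) : MismatchInside p.1 q.2 := by
  have h6 := (table_facts hp).2.2.2.2.2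
  exact mismatchInsideB_spec (h6 q hq).2

theorem table_fst_ne_nil {p : List Char × List Char} (hp : p ∈ altDays) : p.1 ≠ [] := by
  obtain ⟨a, t, he, _⟩ := table_fst_shape hp
  simp [he]

theorem rep1_nil_input (p r : List Char) : rep1 p r [] = [] := by rw [rep1]

theorem foldRep_nil_input (ps : List (List Char × List Char)) : foldRep ps [] = [] := by
  induction ps with
  | nil => rfl
  | cons p ps ih => simpa [foldRep, rep1_nil_input] using ih

theorem foldRep_prepend {ps : List (List Char × List Char)} {u : List Char}
    (h : ∀ p ∈ ps, MismatchInside p.1 u) :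
    ∀ x, foldRep ps (u ++ x) = u ++ foldRep ps x := by
  induction ps with
  | nil => intro x; rfl
  | cons p ps ih =>
    intro x
    show foldRep ps (rep1 p.1 p.2 (u ++ x)) = u ++ foldRep ps (rep1 p.1 p.2 x)
    rw [rep1_append p.2 (h p (by simp)) x]
    exact ih (fun q hq => h q (by simp [hq])) _

theorem foldRep_cons_char {ps : List (List Char × List Char)} {c : Char}
    (hsub : ∀ p ∈ ps, p ∈ altDays) :
    ∀ t, (∀ p ∈ ps, ¬ p.1 <+: (c :: t)) → foldRep ps (c :: t) = c :: foldRep ps t := by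
  induction ps with
  | nil => intro t _; rfl
  | cons p ps ih =>
    intro t hnp
    have hrep : rep1 p.1 p.2 (c :: t) = c :: rep1 p.1 p.2 t := by
      rw [rep1, if_neg]
      intro hpre
      exact hnp p (by simp) (List.isPrefixOf_iff_prefix.mp hpre)
    show foldRep ps (rep1 p.1 p.2 (c :: t)) = c :: foldRep ps (rep1 p.1 p.2 t)
    rw [hrep]
    apply ih (fun q hq => hsub q (by simp [hq]))
    intro q hq hqpre
    match hm : q.1, hqpre with
    | a :: w', hqpre =>
      rcases List.cons_prefix_cons.mp hqpre with ⟨rfl, hw⟩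
      have hqD := hsub q (by simp [hq])
      obtain ⟨a', w'', hqe, _, hwFC⟩ := table_fst_shape hqD
      rw [hm] at hqe
      obtain ⟨rfl, rfl⟩ : a = a' ∧ w' = w'' := by
        constructor <;> [exact (List.cons.injEq .. ▸ hqe).1; exact (List.cons.injEq .. ▸ hqe).2]
      have hpD := hsub p (by simp)
      have hinv := rep1_prefix_inv
        (by obtain ⟨x, y, h1, h2, _⟩ := table_fst_shape hpD; exact ⟨x, y, h1, h2⟩)
        (table_snd_shape hpD) t w' hwFC
      exact hnp q (by simp [hq]) (by rw [hm]; exact List.cons_prefix_cons.mpr ⟨rfl, hinv.mp hw⟩)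
    | [], hqpre =>
      exact absurd hm (by have := table_fst_ne_nil (hsub q (by simp [hq])); simp_all)

theorem foldRep_append_ps (ps qs : List (List Char × List Char)) (s : List Char) :
    foldRep (ps ++ qs) s = foldRep qs (foldRep ps s) := by
  simp [foldRep, List.foldl_append]

theorem altGo_none {c : Char} {t : List Char}
    (hf : altDays.find? (fun p => PySem.Chars.startswith (c :: t) p.1) = none) :
    altGo (c :: t) = c :: altGo t := by
  rw [altGo]
  split
  · rename_i p hp; rw [hf] at hp; exact absurd hp (by simp)
  · rfl

theorem altGo_some {c : Char} {t : List Char} {p : List Char × List Char}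
    (hf : altDays.find? (fun p => PySem.Chars.startswith (c :: t) p.1) = some p) :
    altGo (c :: t) = p.2 ++ altGo ((c :: t).drop p.1.length) := by
  rw [altGo]
  split
  · rename_i q hq; rw [hf] at hq; cases hq; rfl
  · rename_i hq; rw [hf] at hq; exact absurd hq (by simp)

-- main lemma: A's sequential passes equal B's single scan
theorem foldRep_eq_altGo : ∀ k s, s.length ≤ k → foldRep altDays s = altGo s := by
  intro k
  induction k with
  | zero =>
    intro s hs
    have : s = [] := by cases s <;> simp_all
    subst this
    rw [altGo, foldRep_nil_input]
  | succ m ih =>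
    intro s hs
    match s with
    | [] => rw [altGo, foldRep_nil_input]
    | c :: t =>
      cases hf : altDays.find? (fun p => PySem.Chars.startswith (c :: t) p.1) with
      | none =>
        rw [altGo_none hf]
        have hall : ∀ p ∈ altDays, ¬ p.1 <+: (c :: t) := by
          intro p hp hpre
          have := List.find?_eq_none.mp hf p hp
          simp only [PySem.Chars.startswith] at this
          exact this (List.isPrefixOf_iff_prefix.mpr hpre)
        rw [foldRep_cons_char (fun p hp => hp) t hall]
        rw [ih t (by simp at hs; omega)]
      | some p =>
        rw [altGo_some hf]
        obtain ⟨hpb, pre, post, heq, hpre_fail⟩ := List.find?_eq_some_iff_append.mp hf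
        have hpD : p ∈ altDays := by rw [heq]; simp
        have hppre : p.1 <+: (c :: t) := by
          simpa [PySem.Chars.startswith, List.isPrefixOf_iff_prefix] using hpb
        obtain ⟨u, hu⟩ := hppre
        obtain ⟨nh, nt, hne, hnFC, _⟩ := table_fst_shape hpD
        -- split the table at the first match
        rw [heq, foldRep_append_ps]
        have hprefix_mm : ∀ q ∈ pre, MismatchInside q.1 p.1 := by
          intro q hq
          have hqD : q ∈ altDays := by rw [heq]; simp [hq]
          apply table_mismatch_fst hqD hpD
          intro hq1
          have := hpre_fail q hq
          rw [hq1] at this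
          simp [hpb] at this
        -- pre-part passes leave the leading occurrence of p.1 alone
        have h1 : foldRep pre (c :: t) = p.1 ++ foldRep pre u := by
          rw [← hu]; exact foldRep_prepend hprefix_mm u
        rw [show foldRep (p :: post) (foldRep pre (c :: t))
              = foldRep post (rep1 p.1 p.2 (foldRep pre (c :: t))) from rfl]
        rw [h1]
        -- the match itself
        have h2 : rep1 p.1 p.2 (p.1 ++ foldRep pre u) = p.2 ++ rep1 p.1 p.2 (foldRep pre u) := by
          rw [hne, List.cons_append, rep1, if_pos]
          · have : (nt ++ foldRep pre u).drop ((nh :: nt).length - 1) = foldRep pre u := by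
              simp
            rw [this]
          · exact List.isPrefixOf_iff_prefix.mpr (by simp)
        rw [h2]
        -- post-part passes pass over the inserted Dutch word
        have h3 : foldRep post (p.2 ++ rep1 p.1 p.2 (foldRep pre u))
            = p.2 ++ foldRep post (rep1 p.1 p.2 (foldRep pre u)) := by
          apply foldRep_prepend
          intro q hq
          exact table_mismatch_snd (by rw [heq]; simp [hq]) hpD
        rw [h3]
        -- reassemble into one full pass over the tail u
        have h4 : foldRep post (rep1 p.1 p.2 (foldRep pre u)) = foldRep altDays u := by
          rw [heq, foldRep_append_ps]
          rfl
        rw [h4]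
        have hlen : u.length ≤ m := by
          have : p.1.length + u.length = t.length + 1 := by
            have := congrArg List.length hu
            simpa using this
          have hn1 : 1 ≤ p.1.length := by rw [hne]; simp
          simp at hs; omega
        rw [ih u hlen]
        have hdrop : (c :: t).drop p.1.length = u := by
          rw [← hu, List.drop_left]
        rw [hdrop]

-- A's fold over string pairs, rewritten through rep1 / foldRep
theorem foldl_step_eq (ps : List (String × String)) (hps : ∀ p ∈ ps, p.1.toList ≠ []) :
    ∀ s : String,
      ps.foldl (fun s p => if PySem.Str.isIn p.1 s then PySem.Str.replace s p.1 p.2 else s) s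
      = String.ofList (foldRep (ps.map (fun p => (p.1.toList, p.2.toList))) s.toList) := by
  induction ps with
  | nil => intro s; simp [foldRep]
  | cons p ps ih =>
    intro s
    have hp1 : p.1.toList ≠ [] := hps p (by simp)
    have hstep : (if PySem.Str.isIn p.1 s then PySem.Str.replace s p.1 p.2 else s)
        = PySem.Str.replace s p.1 p.2 := by
      by_cases h : PySem.Str.isIn p.1 s
      · rw [if_pos h]
      · rw [if_neg h]
        have hni : ¬ p.1.toList <:+: s.toList := by
          rw [← PySem.Chars.isIn_eq_false_iff]
          simpa [PySem.Str.isIn] using h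
        have : PySem.Str.replace s p.1 p.2 = String.ofList s.toList := by
          unfold PySem.Str.replace
          rw [replace_eq_rep1 _ _ _ hp1]
          rw [rep1_of_not_infix _ _ _ hni]
        rw [this, String.ofList_toList]
    rw [List.foldl_cons, hstep, ih (fun q hq => hps q (by simp [hq]))]
    have : (PySem.Str.replace s p.1 p.2).toList = rep1 p.1.toList p.2.toList s.toList := by
      rw [PySem.Str.toList_replace, replace_eq_rep1 _ _ _ hp1]
    rw [List.map_cons]
    show _ = String.ofList (foldRep _ (rep1 p.1.toList p.2.toList s.toList))
    rw [← this]

-- ===== VERDICT (by name: the statement is the Claim_ definition above) =====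
theorem convert_days_to_dutch_spec : Claim_equal_convert_days_to_dutch := by
  intro s _
  show convert_days_to_dutch s = convert_days_to_dutch_alt s
  have hA : convert_days_to_dutch s = List.foldl
      (fun s p => if PySem.Str.isIn p.1 s then PySem.Str.replace s p.1 p.2 else s) s
      [("Monday", "Maandag"), ("Tuesday", "Dinsdag"), ("Wednesday", "Woensdag"),
       ("Thursday", "Donderdag"), ("Friday", "Vrijdag"), ("Saturday", "Zaterdag"),
       ("Sunday", "Zondag")] := rfl
  have hmap : ([("Monday", "Maandag"), ("Tuesday", "Dinsdag"), ("Wednesday", "Woensdag"),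
      ("Thursday", "Donderdag"), ("Friday", "Vrijdag"), ("Saturday", "Zaterdag"),
      ("Sunday", "Zondag")] : List (String × String)).map
        (fun p => (p.1.toList, p.2.toList)) = altDays := by decide
  rw [hA, foldl_step_eq _ (by decide), hmap,
    foldRep_eq_altGo s.toList.length s.toList le_rfl]
  rfl
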